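-- pv_equiv track=rewrite | github.com/umj95/Exploring_Historic_NER_Transferability | nlp_project_functions.py | make_sentences
-- ===== SOURCE A (Python) =====
-- def make_sentences(list: list) -> list:
--     """Takes a list of tokens and creates a list of sentences created from the tokens
--
--     Args:
--         list (The list of tokens): A list of tokens. Sentences are expected to be divided by NaN values
--
--     Returns:
--         list: A list of all generated sentences
--     """
--     return_list = []
--     sentence = ''
--     for x in list:
--         if isinstance(x, str):
--             if x in [".", "!", "?", ":", ",", ";"]:
--                 sentence += x
--             else:
--                 sentence += (" " + x)
--         else:
--             return_list.append(sentence)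
--             sentence = ''
--     return_list.append(sentence)
--     return return_list
-- ===== SOURCE B (Python) =====
-- def make_sentences(list: list) -> list:
--     """Partition the tokens into groups (a new group at each non-string/NaN), then join each group."""
--     PUNCT = {".", "!", "?", ":", ",", ";"}
--     groups = [[]]
--     for t in list:
--         if isinstance(t, str):
--             groups[-1].append(t)
--         else:
--             groups.append([])
--     return [''.join(t if t in PUNCT else ' ' + t for t in g) for g in groups]
-- ===== Notes on version B (the rewrite author's own statement) =====
-- stated objective: idiomatic
-- what changed: A builds sentences in a single pass with a mutable string accumulator flushed at each NaN; B first recursively splits the tokens into groups at each NaN and then joins each group independently.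
import Mathlib
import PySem

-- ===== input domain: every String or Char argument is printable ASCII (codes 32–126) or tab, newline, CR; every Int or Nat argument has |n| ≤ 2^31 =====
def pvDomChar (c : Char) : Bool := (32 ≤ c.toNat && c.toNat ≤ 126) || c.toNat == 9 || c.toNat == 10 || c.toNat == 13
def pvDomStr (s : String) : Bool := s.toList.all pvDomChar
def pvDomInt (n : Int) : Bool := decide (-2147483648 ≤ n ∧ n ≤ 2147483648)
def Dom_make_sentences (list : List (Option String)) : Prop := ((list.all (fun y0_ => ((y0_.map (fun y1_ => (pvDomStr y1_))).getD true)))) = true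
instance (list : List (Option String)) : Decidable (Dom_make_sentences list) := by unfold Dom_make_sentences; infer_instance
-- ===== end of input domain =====

-- B restructures A's single accumulating pass (string built up, flushed at each NaN) as:
-- partition the tokens into groups at each NaN, then join each group (objective: more idiomatic decomposition).

-- ===== PORT A =====
-- literal port of A: one pass accumulating (return_list, sentence), final append of sentence
def make_sentences (list : List (Option String)) : List String :=
  let st := list.foldl (fun (acc : List String × String) x =>
    match x with
    | some s =>
      if s ∈ [".", "!", "?", ":", ",", ";"] then (acc.1, acc.2 ++ s)
      else (acc.1, acc.2 ++ (" " ++ s))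
    | none => (acc.1 ++ [acc.2], "")) ([], "")
  st.1 ++ [st.2]

-- ===== PORT B =====
-- Source B's ''.join(t if t in PUNCT else ' ' + t for t in g)
def pvJoin (g : List String) : String :=
  PySem.Str.join "" (g.map (fun t => if t ∈ [".", "!", "?", ":", ",", ";"] then t else " " ++ t))

-- Source B: groups = [[]]; append each string to groups[-1], start a new group at each none; then join each group
def make_sentences_alt (list : List (Option String)) : List String :=
  let groups := list.foldl (fun (gs : List (List String)) t =>
    match t with
    | some s => gs.dropLast ++ [(gs.getLast?.getD []) ++ [s]]
    | none => gs ++ [[]]) [[]]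
  groups.map pvJoin

-- ===== PRECONDITION & SPEC =====
def Spec_make_sentences (list : List (Option String)) (out : List String) : Prop := out = make_sentences_alt list
instance (list : List (Option String)) (out : List String) : Decidable (Spec_make_sentences list out) := by unfold Spec_make_sentences; infer_instance

-- ===== CLAIM (what is proved, stated in full; the proofs are below) =====
def Claim_equal_make_sentences : Prop := ∀ (list : List (Option String)), Dom_make_sentences list → Spec_make_sentences list (make_sentences list)

-- ===== LEMMAS AND PROOFS =====

lemma pvJoin_nil : pvJoin [] = "" := by
  simp [pvJoin, PySem.Str.join, PySem.Chars.join, List.intercalate]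

lemma pvJoin_cons (t : String) (g : List String) :
    pvJoin (t :: g) = (if t ∈ [".", "!", "?", ":", ",", ";"] then t else " " ++ t) ++ pvJoin g := by
  simp only [pvJoin, PySem.Str.join, PySem.Chars.join, List.map_cons]
  cases g <;> simp [List.intercalate, String.ofList_append, String.ofList_toList]

lemma pvJoin_concat (g : List String) (s : String) :
    pvJoin (g ++ [s]) = pvJoin g ++ (if s ∈ [".", "!", "?", ":", ",", ";"] then s else " " ++ s) := by
  induction g with
  | nil => simp [pvJoin_nil, pvJoin_cons]
  | cons a g ih => simp [pvJoin_cons, ih, String.append_assoc]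

-- the corresponding loop invariant: A's state is (joined finished groups, join of the current group)
lemma fold_eq (l : List (Option String)) :
    ∀ (done : List (List String)) (cur : List String),
    (l.foldl (fun (acc : List String × String) x =>
      match x with
      | some s =>
        if s ∈ [".", "!", "?", ":", ",", ";"] then (acc.1, acc.2 ++ s)
        else (acc.1, acc.2 ++ (" " ++ s))
      | none => (acc.1 ++ [acc.2], "")) (done.map pvJoin, pvJoin cur)) =
    (let gs := l.foldl (fun (gs : List (List String)) t =>
        match t with
        | some s => gs.dropLast ++ [(gs.getLast?.getD []) ++ [s]]
        | none => gs ++ [[]]) (done ++ [cur])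
     (gs.dropLast.map pvJoin, pvJoin (gs.getLast?.getD []))) := by
  induction l with
  | nil =>
    intro done cur
    simp
  | cons t toks ih =>
    intro done cur
    cases t with
    | some s =>
      simp only [List.foldl_cons, List.dropLast_concat, List.getLast?_concat, Option.getD_some]
      by_cases hs : s ∈ [".", "!", "?", ":", ",", ";"] <;>
        simp only [hs, if_pos, ite_false] <;>
        · have := ih done (cur ++ [s])
          rw [pvJoin_concat] at this
          simpa [hs] using this
    | none =>
      simp only [List.foldl_cons]
      have := ih (done ++ [cur]) []
      simpa [pvJoin_nil, List.append_assoc] using this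

-- ===== VERDICT (by name: the statement is the Claim_ definition above) =====
lemma bfold_ne_nil (l : List (Option String)) :
    ∀ (gs : List (List String)), gs ≠ [] →
    (l.foldl (fun (gs : List (List String)) t =>
        match t with
        | some s => gs.dropLast ++ [(gs.getLast?.getD []) ++ [s]]
        | none => gs ++ [[]]) gs) ≠ [] := by
  induction l with
  | nil => intro gs h; simpa using h
  | cons t toks ih =>
    intro gs h
    cases t <;> · simp only [List.foldl_cons]; exact ih _ (by simp)

theorem make_sentences_spec : Claim_equal_make_sentences := by
  intro l _
  unfold Spec_make_sentences make_sentences make_sentences_alt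
  have h := fold_eq l [] []
  simp only [List.map_nil, pvJoin_nil, List.nil_append] at h
  rw [h]
  have hne := bfold_ne_nil l [[]] (by simp)
  set gs := l.foldl (fun (gs : List (List String)) t =>
    match t with
    | some s => gs.dropLast ++ [(gs.getLast?.getD []) ++ [s]]
    | none => gs ++ [[]]) [[]] with hgs
  rw [List.getLast?_eq_some_getLast hne]
  conv_rhs => rw [← List.dropLast_append_getLast hne]
  simp
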